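-- pv_equiv track=rewrite | github.com/ClarinCodes/fcc-daily-coding-challenges | Python/219_Anniversary_Milestones.py | get_milestone
-- ===== SOURCE A (Python) =====
-- def get_milestone(years):
--     anniversaries = [
--      #(y, label)
--       (1, "Paper"),
--       (5, "Wood"),
--       (10, "Tin"),
--       (25, "Silver"),
--       (40, "Ruby"),
--       (50, "Gold"),
--       (60, "Diamond"),
--       (70, "Platinum")
--     ]
--     for y, label in reversed(anniversaries): # we can reverse the list instead of using reversed() here.
--         if years >= y:
--             return label
--     return "Newlyweds"
-- ===== SOURCE B (Python) =====
-- def get_milestone(years):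
--     thresholds = [1, 5, 10, 25, 40, 50, 60, 70]
--     labels = ["Paper", "Wood", "Tin", "Silver", "Ruby", "Gold", "Diamond", "Platinum"]
--     lo, hi = 0, len(thresholds)
--     while lo < hi:  # bisect_right by hand: first index with thresholds[idx] > years
--         mid = (lo + hi) // 2
--         if years >= thresholds[mid]:
--             lo = mid + 1
--         else:
--             hi = mid
--     return "Newlyweds" if lo == 0 else labels[lo - 1]
-- ===== Notes on version B (the rewrite author's own statement) =====
-- stated objective: alternative
-- what changed: Replaces the linear scan of the reversed (threshold,label) table with a hand-written bisect_right binary search over a sorted thresholds list indexed into a parallel labels list.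
import Mathlib
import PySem

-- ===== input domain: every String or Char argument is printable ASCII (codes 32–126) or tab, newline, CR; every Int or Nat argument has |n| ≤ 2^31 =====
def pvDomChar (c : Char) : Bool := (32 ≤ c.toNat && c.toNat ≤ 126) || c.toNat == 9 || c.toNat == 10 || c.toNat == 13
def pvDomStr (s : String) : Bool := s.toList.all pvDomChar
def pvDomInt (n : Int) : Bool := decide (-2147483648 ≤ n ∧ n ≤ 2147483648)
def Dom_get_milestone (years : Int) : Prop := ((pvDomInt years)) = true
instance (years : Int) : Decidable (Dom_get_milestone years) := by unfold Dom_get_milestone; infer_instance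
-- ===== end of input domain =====

-- B replaces A's linear scan of the reversed (threshold, label) table with a hand-written
-- bisect_right binary search over a sorted thresholds list and a parallel labels list (alternative).

-- ===== PORT A =====
-- the 'for y, label in reversed(anniversaries): if years >= y: return label' loop
def pvLoopA (years : Int) : List (Int × String) → String
  | [] => "Newlyweds"
  | (y, label) :: rest => if years ≥ y then label else pvLoopA years rest

def get_milestone (years : Int) : String :=
  let anniversaries : List (Int × String) :=
    [(1, "Paper"), (5, "Wood"), (10, "Tin"), (25, "Silver"),
     (40, "Ruby"), (50, "Gold"), (60, "Diamond"), (70, "Platinum")]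
  pvLoopA years anniversaries.reverse

-- ===== PORT B =====
-- the 'while lo < hi' bisect_right loop of Source B, recursion on hi - lo
def pvBisect (years : Int) (ts : List Int) (lo hi : Nat) : Nat :=
  if h : lo < hi then
    let mid := (lo + hi) / 2
    if years ≥ ts.getD mid 0 then pvBisect years ts (mid + 1) hi
    else pvBisect years ts lo mid
  else lo
termination_by hi - lo
decreasing_by all_goals omega

def get_milestone_alt (years : Int) : String :=
  let thresholds : List Int := [1, 5, 10, 25, 40, 50, 60, 70]
  let labels : List String := ["Paper", "Wood", "Tin", "Silver", "Ruby", "Gold", "Diamond", "Platinum"]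
  let lo := pvBisect years thresholds 0 thresholds.length
  if lo = 0 then "Newlyweds" else labels.getD (lo - 1) ""

-- ===== PRECONDITION & SPEC =====
def Spec_get_milestone (years : Int) (out : String) : Prop := out = get_milestone_alt years
instance (years : Int) (out : String) : Decidable (Spec_get_milestone years out) := by unfold Spec_get_milestone; infer_instance

-- ===== CLAIM (what is proved, stated in full; the proofs are below) =====
def Claim_equal_get_milestone : Prop := ∀ (years : Int), Dom_get_milestone years → Spec_get_milestone years (get_milestone years)

-- ===== LEMMAS AND PROOFS =====

-- the binary search on the literal 8-entry table evaluates to bisect_right's index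
theorem bisect_eval (years : Int) :
    pvBisect years [1, 5, 10, 25, 40, 50, 60, 70] 0 8 =
      (if years ≥ 40 then
        (if years ≥ 60 then (if years ≥ 70 then 8 else 7)
         else (if years ≥ 50 then 6 else 5))
       else
        (if years ≥ 10 then (if years ≥ 25 then 4 else 3)
         else (if years ≥ 5 then 2 else (if years ≥ 1 then 1 else 0)))) := by
  rw [pvBisect]; norm_num [List.getD]
  by_cases h : years ≥ 40
  · simp only [h, if_true]
    rw [pvBisect]; norm_num [List.getD]
    by_cases h : years ≥ 60
    · simp only [h, if_true]
      rw [pvBisect]; norm_num [List.getD]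
      by_cases h : years ≥ 70
      · simp only [h, if_true]
        rw [pvBisect]; norm_num
      · simp only [h, if_false]
        rw [pvBisect]; norm_num
    · simp only [h, if_false]
      rw [pvBisect]; norm_num [List.getD]
      by_cases h : years ≥ 50
      · simp only [h, if_true]
        rw [pvBisect]; norm_num
      · simp only [h, if_false]
        rw [pvBisect]; norm_num
  · simp only [h, if_false]
    rw [pvBisect]; norm_num [List.getD]
    by_cases h : years ≥ 10
    · simp only [h, if_true]
      rw [pvBisect]; norm_num [List.getD]
      by_cases h : years ≥ 25
      · simp only [h, if_true]
        rw [pvBisect]; norm_num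
      · simp only [h, if_false]
        rw [pvBisect]; norm_num
    · simp only [h, if_false]
      rw [pvBisect]; norm_num [List.getD]
      by_cases h : years ≥ 5
      · simp only [h, if_true]
        rw [pvBisect]; norm_num
      · simp only [h, if_false]
        rw [pvBisect]; norm_num [List.getD]
        by_cases h : years ≥ 1
        · simp only [h, if_true]
          rw [pvBisect]; norm_num
        · simp only [h, if_false]
          rw [pvBisect]; norm_num

-- ===== VERDICT (by name: the statement is the Claim_ definition above) =====
theorem get_milestone_spec : Claim_equal_get_milestone := by
  intro years _
  unfold Spec_get_milestone get_milestone get_milestone_alt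
  simp only [List.length_cons, List.length_nil, List.reverse, List.reverseAux, pvLoopA]
  rw [bisect_eval]
  split_ifs <;> first | rfl | contradiction | omega | norm_num [List.getD]
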